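-- pv_equiv track=rewrite | github.com/ariellubonja/coding-interview-prep | xhoni/task1.py | solution
-- ===== SOURCE A (Python) =====
-- def solution(T, R):
--     # Find the position of the number
--     digit_pos = [i for i in range(len((T[0]))) if T[0][i].isdigit()][0]
--
--     # Find the number of test groups
--     # digits = [int(c[digit_pos]) for c in T]
--     # number_of_groups = max(digits)
--
--     dict = {}
--
--     T_pos = 0
--     # Populate dictionary
--     while T_pos < len(T):
--         if int(T[T_pos][digit_pos]) not in dict:
--             dict[int(T[T_pos][digit_pos])] = [R[T_pos]]
--         else:
--             dict[int(T[T_pos][digit_pos])].append(R[T_pos])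
--         T_pos += 1
--
--     for k in dict.keys():
--         for val in dict[k]:
--             if val != "OK":
--                 dict[k] = False
--                 break
--             dict[k] = True
--
--     score = 0
--     score_per_group = int(100 / len(dict))
--
--     # score += []
--
--     for val in dict.values():
--         if val == 1:
--             score += score_per_group
--
--         # Map scores to this group
--
--     # If group is full of OK, we count it
--
--     return score
-- ===== SOURCE B (Python) =====
-- def solution(T, R):
--     # No dict at all: two plain lists, `keys` (distinct group keys, first-seen
--     # order) and `bad` (keys that have seen a non-"OK" result), then arithmetic.
--     digit_pos = [i for i in range(len(T[0])) if T[0][i].isdigit()][0]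
--     keys = []
--     bad = []
--     for i in range(len(T)):
--         k = int(T[i][digit_pos])
--         if k not in keys:
--             keys.append(k)
--         if R[i] != "OK" and k not in bad:
--             bad.append(k)
--     score_per_group = int(100 / len(keys))
--     return score_per_group * (len(keys) - len(bad))
-- ===== Notes on version B (the rewrite author's own statement) =====
-- stated objective: alternative
-- what changed: A builds a dict key -> list of results, then a second loop with an inner scan overwrites each value with a bool, then a third loop sums per true value; B keeps no dict: one pass maintains two plain lists, the distinct keys and the keys that saw a non-OK result, and the score is score_per_group * (len(keys) - len(bad)).
import Mathlib
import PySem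

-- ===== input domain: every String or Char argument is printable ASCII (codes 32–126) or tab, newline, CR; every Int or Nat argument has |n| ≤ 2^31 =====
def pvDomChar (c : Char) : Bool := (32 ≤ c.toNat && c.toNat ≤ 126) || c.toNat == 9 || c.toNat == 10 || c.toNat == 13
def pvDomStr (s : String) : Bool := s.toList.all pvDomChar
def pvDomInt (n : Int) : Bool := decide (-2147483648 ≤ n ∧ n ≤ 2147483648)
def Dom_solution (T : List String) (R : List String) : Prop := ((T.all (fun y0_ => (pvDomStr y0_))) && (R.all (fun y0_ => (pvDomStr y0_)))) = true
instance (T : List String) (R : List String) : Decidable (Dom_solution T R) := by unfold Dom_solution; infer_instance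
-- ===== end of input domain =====

-- B replaces A's dict-of-result-lists plus rescanning passes by one dict-free pass over two
-- plain lists (distinct keys, keys with a non-OK result) and an arithmetic final score.


-- ===== PORT A =====
-- inner loop "for val in dict[k]: if val != 'OK': dict[k] = False; break; dict[k] = True"
-- ([] is unreachable: every group is created with one element)
def checkVals : List String → Bool
  | [] => true
  | v :: rest => if v != "OK" then false else checkVals rest

def solution (T : List String) (R : List String) : Int :=
  match PySem.List.pyGet? T 0 with
  | none => 0  -- T[0]: IndexError, outside Pre_
  | some t0 =>
    -- digit_pos = [i for i in range(len(T[0])) if T[0][i].isdigit()][0]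
    match ((List.range t0.toList.length).filter
            (fun i => PySem.Chars.isdigit (t0.toList.getD i ' '))).head? with
    | none => 0  -- [..][0]: IndexError, outside Pre_
    | some digit_pos =>
      -- while T_pos < len(T): populate dict  (dict: key -> list of results)
      let d := (PySem.List.pyRange 0 (T.length : Int) 1).foldl (fun d i =>
        -- int(T[T_pos][digit_pos]); defaults unreachable under Pre_
        let k := (PySem.Int.ofChars?
          [(PySem.Chars.pyGet? (PySem.List.pyGetD T i "").toList (digit_pos : Int)).getD ' ']).getD 0
        let r := PySem.List.pyGetD R i ""  -- R[T_pos]; default unreachable under Pre_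
        match d.get? k with
        | none => d.insert k [r]
        | some vs => d.insert k (vs ++ [r])) PySem.Dict.empty
      -- for k in dict.keys(): ... dict[k] becomes a Bool; Python overwrites values in place
      -- (key order is preserved), modelled as building the resulting Bool dict over the same keys
      let d2 := d.keys.foldl (fun d2 k => d2.insert k (checkVals (d.getD k [])))
                  (PySem.Dict.empty : PySem.Dict Int Bool)
      -- score_per_group = int(100 / len(dict)): truncated float division, exact (|100| < 2^53)
      let spg := PySem.Int.truncdiv 100 (d2.size : Int)
      -- for val in dict.values(): if val == 1: score += score_per_group  (True == 1)
      d2.values.foldl (fun score v => if v == true then score + spg else score) 0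

-- ===== PORT B =====
def solution_alt (T : List String) (R : List String) : Int :=
  match PySem.List.pyGet? T 0 with
  | none => 0  -- T[0]: IndexError, outside Pre_
  | some t0 =>
    match ((List.range t0.toList.length).filter
            (fun i => PySem.Chars.isdigit (t0.toList.getD i ' '))).head? with
    | none => 0  -- [..][0]: IndexError, outside Pre_
    | some digit_pos =>
      -- one pass over two plain lists: keys (distinct, first-seen order), bad (keys with a non-OK)
      let st := (PySem.List.pyRange 0 (T.length : Int) 1).foldl (fun st i =>
        let k := (PySem.Int.ofChars?
          [(PySem.Chars.pyGet? (PySem.List.pyGetD T i "").toList (digit_pos : Int)).getD ' ']).getD 0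
        let keys := if k ∈ st.1 then st.1 else st.1 ++ [k]
        let bad := if PySem.List.pyGetD R i "" ≠ "OK" ∧ k ∉ st.2 then st.2 ++ [k] else st.2
        (keys, bad)) (([] : List Int), ([] : List Int))
      -- score_per_group = int(100 / len(keys)); score_per_group * (len(keys) - len(bad))
      let spg := PySem.Int.truncdiv 100 (st.1.length : Int)
      spg * ((st.1.length : Int) - (st.2.length : Int))

-- ===== PRECONDITION & SPEC =====
-- Pre_: exactly where Python A returns: T nonempty, T[0] has a digit (first digit position p),
-- every T[i] has a digit at position p (so int(...) parses), and R covers every index of T.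
-- Bool-valued so that it evaluates cheaply; p = first digit position of T[0]
def pvPreB (T : List String) (R : List String) : Bool :=
  !T.isEmpty && T.length ≤ R.length &&
  (T.headD "").toList.any PySem.Chars.isdigit &&
  T.all (fun t =>
    ((t.toList[(T.headD "").toList.findIdx PySem.Chars.isdigit]?).map PySem.Chars.isdigit).getD false)
def Pre_solution (T : List String) (R : List String) : Prop := pvPreB T R = true
instance (T : List String) (R : List String) : Decidable (Pre_solution T R) := by
  unfold Pre_solution; infer_instance

def pvWitness_solution : List String × List String := (["a1x", "b1y", "a2"], ["OK", "OK", "no"])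

def Spec_solution (T : List String) (R : List String) (out : Int) : Prop := out = solution_alt T R
instance (T : List String) (R : List String) (out : Int) : Decidable (Spec_solution T R out) := by unfold Spec_solution; infer_instance

-- ===== CLAIM (what is proved, stated in full; the proofs are below) =====
def Claim_equal_solution : Prop := ∀ (T : List String) (R : List String), Dom_solution T R → Pre_solution T R → Spec_solution T R (solution T R)

-- ===== LEMMAS AND PROOFS =====

-- A's list-valued dict mapped value-wise to a Bool "all-OK" dict (proof-internal bridge)
def pvMapV (d : PySem.Dict Int (List String)) : PySem.Dict Int Bool :=
  PySem.Dict.mk (d.items.map (fun p => (p.1, p.2.all (fun s => s == "OK"))))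

theorem pvMapV_keys (d : PySem.Dict Int (List String)) : (pvMapV d).keys = d.keys := by
  simp [pvMapV, PySem.Dict.keys]

theorem pvMapV_contains (d : PySem.Dict Int (List String)) (k : Int) :
    (pvMapV d).contains k = d.contains k := by
  rw [PySem.Dict.contains_eq_decide_mem_keys, PySem.Dict.contains_eq_decide_mem_keys, pvMapV_keys]

theorem pvMapV_get? (d : PySem.Dict Int (List String)) (k : Int) :
    (pvMapV d).get? k = (d.get? k).map (fun vs => vs.all (fun s => s == "OK")) := by
  obtain ⟨items⟩ := d
  induction items with
  | nil => rfl
  | cons p rest ih =>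
    obtain ⟨a, v⟩ := p
    rw [show pvMapV ⟨(a, v) :: rest⟩ = ⟨(a, v.all (fun s => s == "OK")) :: ((pvMapV ⟨rest⟩).items)⟩ from rfl]
    rw [PySem.Dict.get?_mk_cons, PySem.Dict.get?_mk_cons]
    split
    · rfl
    · exact ih

theorem pvMapV_insert (d : PySem.Dict Int (List String)) (k : Int) (v : List String) :
    pvMapV (d.insert k v) = (pvMapV d).insert k (v.all (fun s => s == "OK")) := by
  apply PySem.Dict.ext
  show (d.insert k v).items.map _ = _
  rw [PySem.Dict.items_insert, PySem.Dict.items_insert, pvMapV_contains]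
  split
  · show _ = ((pvMapV d).items).map _
    simp only [pvMapV, List.map_map]
    apply List.map_congr_left
    intro p _
    by_cases h : (p.1 == k) = true <;> simp [h, Function.comp]
  · simp [pvMapV]

theorem step_rel (d : PySem.Dict Int (List String)) (k : Int) (r : String) :
    pvMapV (match d.get? k with
            | none => d.insert k [r]
            | some vs => d.insert k (vs ++ [r]))
      = (pvMapV d).insert k ((pvMapV d).getD k true && (r == "OK")) := by
  cases h : d.get? k with
  | none =>
    simp only [pvMapV_insert, PySem.Dict.getD_eq_get?_getD, pvMapV_get?, h]
    simp
  | some vs =>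
    simp only [pvMapV_insert, PySem.Dict.getD_eq_get?_getD, pvMapV_get?, h]
    simp [List.all_append]

theorem checkVals_eq_all (vs : List String) : checkVals vs = vs.all (fun s => s == "OK") := by
  induction vs with
  | nil => rfl
  | cons v rest ih =>
    simp only [checkVals, List.all_cons, ih, bne]
    cases v == "OK" <;> simp

-- a fused Bool-dict fold tracks pvMapV of A's grouping fold
theorem fold_rel (f : Int → Int) (r : Int → String) (l : List Int)
    (d : PySem.Dict Int (List String)) :
    l.foldl (fun g i => g.insert (f i) (g.getD (f i) true && (r i == "OK"))) (pvMapV d)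
      = pvMapV (l.foldl (fun d i =>
          match d.get? (f i) with
          | none => d.insert (f i) [r i]
          | some vs => d.insert (f i) (vs ++ [r i])) d) := by
  induction l generalizing d with
  | nil => rfl
  | cons i rest ih =>
    simp only [List.foldl_cons]
    rw [← step_rel d (f i) (r i), ih]

theorem groupA_keys_nodup (f : Int → Int) (r : Int → String) (l : List Int)
    (d : PySem.Dict Int (List String)) (h : d.keys.Nodup) :
    (l.foldl (fun d i =>
        match d.get? (f i) with
        | none => d.insert (f i) [r i]
        | some vs => d.insert (f i) (vs ++ [r i])) d).keys.Nodup := by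
  induction l generalizing d with
  | nil => exact h
  | cons i rest ih =>
    simp only [List.foldl_cons]
    apply ih
    cases d.get? (f i) <;> exact PySem.Dict.nodup_keys_insert _ _ _ h

-- phase 2 of A rebuilds exactly pvMapV d
theorem phase2_eq (d : PySem.Dict Int (List String)) (hnd : d.keys.Nodup) :
    d.keys.foldl (fun d2 k => d2.insert k (checkVals (d.getD k [])))
        (PySem.Dict.empty : PySem.Dict Int Bool) = pvMapV d := by
  apply PySem.Dict.ext
  rw [PySem.Dict.items_foldl_insert_fresh d.keys (fun k => k) (fun k => checkVals (d.getD k []))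
      PySem.Dict.empty (fun _ _ => PySem.Dict.contains_empty _) (by simpa using hnd)]
  show List.map _ d.keys = (pvMapV d).items
  rw [show (pvMapV d).items = d.items.map (fun p => (p.1, p.2.all (fun s => s == "OK"))) from rfl,
      PySem.Dict.items_eq_map_keys d hnd ([] : List String), List.map_map]
  apply List.map_congr_left
  intro k _
  simp [Function.comp, checkVals_eq_all]

theorem fold_rel' (f : Int → Int) (r : Int → String) (l : List Int) :
    l.foldl (fun g i => g.insert (f i) (g.getD (f i) true && (r i == "OK")))
        (PySem.Dict.empty : PySem.Dict Int Bool)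
      = pvMapV (l.foldl (fun d i =>
          match d.get? (f i) with
          | none => d.insert (f i) [r i]
          | some vs => d.insert (f i) (vs ++ [r i])) PySem.Dict.empty) := by
  rw [show (PySem.Dict.empty : PySem.Dict Int Bool) = pvMapV PySem.Dict.empty from rfl]
  exact fold_rel f r l PySem.Dict.empty

theorem sum_if_true (l : List Bool) (c : Int) (a : Int) :
    l.foldl (fun score v => if v == true then score + c else score) a
      = a + (l.countP (fun v => v)) * c := by
  induction l generalizing a with
  | nil => simp
  | cons v rest ih =>
    cases v
    · rw [List.foldl_cons, ih]; simp [List.countP_cons]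
    · rw [List.foldl_cons, ih]; simp [List.countP_cons]; ring

-- B's (keys, bad) fold tracks the Bool-dict fold: keys = g.keys, bad = the false keys
theorem fold_inv (f : Int → Int) (r : Int → String) (l : List Int)
    (g : PySem.Dict Int Bool) (keys bad : List Int)
    (H1 : keys = g.keys)
    (H2 : ∀ x, x ∈ bad ↔ x ∈ g.keys ∧ g.getD x true = false)
    (H3 : bad.Nodup) (H4 : g.keys.Nodup) :
    let g' := l.foldl (fun g i => g.insert (f i) (g.getD (f i) true && (r i == "OK"))) g
    let st := l.foldl (fun st i =>
        let k := f i
        let keys := if k ∈ st.1 then st.1 else st.1 ++ [k]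
        let bad := if r i ≠ "OK" ∧ k ∉ st.2 then st.2 ++ [k] else st.2
        (keys, bad)) (keys, bad)
    st.1 = g'.keys ∧ (∀ x, x ∈ st.2 ↔ x ∈ g'.keys ∧ g'.getD x true = false)
      ∧ st.2.Nodup ∧ g'.keys.Nodup := by
  induction l generalizing g keys bad with
  | nil => exact ⟨H1, H2, H3, H4⟩
  | cons i rest ih =>
    simp only [List.foldl_cons]
    apply ih
    · -- keys step
      by_cases hk : f i ∈ keys
      · rw [if_pos hk, H1, PySem.Dict.keys_insert_of_contains]
        rw [PySem.Dict.contains_eq_decide_mem_keys]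
        simpa [← H1] using hk
      · rw [if_neg hk, H1, PySem.Dict.keys_insert_of_not_contains]
        rw [PySem.Dict.contains_eq_decide_mem_keys]
        simpa [← H1] using hk
    · -- bad step
      intro x
      by_cases hxk : x = f i
      · subst hxk
        constructor
        · intro hmem
          refine ⟨by simp [PySem.Dict.mem_keys_insert], ?_⟩
          rw [PySem.Dict.getD_insert_self]
          by_cases hc : r i ≠ "OK" ∧ f i ∉ bad
          · have hro : (r i == "OK") = false := by
              simpa [beq_iff_eq] using hc.1
            simp [hro]
          · rw [if_neg hc] at hmem
            have h2 := (H2 (f i)).1 hmem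
            simp [h2.2]
        · intro hpair
          obtain ⟨_, hval⟩ := hpair
          rw [PySem.Dict.getD_insert_self] at hval
          by_cases hc : r i ≠ "OK" ∧ f i ∉ bad
          · rw [if_pos hc]; simp
          · rw [if_neg hc]
            push_neg at hc
            by_cases hok : r i = "OK"
            · have hrb : (r i == "OK") = true := by simpa [beq_iff_eq] using hok
              rw [hrb, Bool.and_true] at hval
              exact (H2 (f i)).2 ⟨by
                by_contra hnm
                have : g.getD (f i) true = true := by
                  apply PySem.Dict.getD_of_not_contains
                  rw [PySem.Dict.contains_eq_decide_mem_keys]; simpa using hnm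
                rw [this] at hval; exact absurd hval (by simp), hval⟩
            · exact hc hok
      · -- x ≠ f i : all three components unchanged for x
        have hbad : (x ∈ (if r i ≠ "OK" ∧ f i ∉ bad then bad ++ [f i] else bad)) ↔ x ∈ bad := by
          split <;> simp [hxk]
        rw [hbad, PySem.Dict.getD_insert, if_neg hxk]
        rw [PySem.Dict.mem_keys_insert, H2 x]
        simp [hxk]
    · -- bad nodup
      by_cases hc : r i ≠ "OK" ∧ f i ∉ bad
      · rw [if_pos hc]
        simpa [List.nodup_append] using ⟨H3, fun a ha h => hc.2 (h ▸ ha)⟩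
      · rw [if_neg hc]; exact H3
    · exact PySem.Dict.nodup_keys_insert _ _ _ H4

-- final arithmetic: countP true over the dict's values = keys.length - bad.length
theorem count_true_eq (g : PySem.Dict Int Bool) (bad : List Int)
    (H2 : ∀ x, x ∈ bad ↔ x ∈ g.keys ∧ g.getD x true = false)
    (H3 : bad.Nodup) (H4 : g.keys.Nodup) :
    (g.values.countP (fun v => v) : Int) = (g.keys.length : Int) - (bad.length : Int) := by
  have hvals : g.values = g.keys.map (fun k => g.getD k true) := by
    have := PySem.Dict.items_eq_map_keys g H4 (true : Bool)
    calc g.values = g.items.map (fun p => p.2) := rfl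
      _ = (g.keys.map (fun k => (k, g.getD k true))).map (fun p => p.2) := by rw [← this]
      _ = g.keys.map (fun k => g.getD k true) := by rw [List.map_map]; rfl
  have hbadlen : bad.length = (g.keys.filter (fun k => !(g.getD k true))).length := by
    have hperm : bad.Perm (g.keys.filter (fun k => !(g.getD k true))) := by
      rw [List.perm_ext_iff_of_nodup H3 (H4.filter _)]
      intro x
      rw [H2 x, List.mem_filter]
      simp
    exact hperm.length_eq
  have hsplit : g.values.countP (fun v => v) + g.values.countP (fun v => !v)
      = g.values.length := by
    induction g.values with
    | nil => simp
    | cons v rest ih => cases v <;> simp [List.countP_cons, ih] <;> omega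
  have hfalse : g.values.countP (fun v => !v)
      = (g.keys.filter (fun k => !(g.getD k true))).length := by
    rw [hvals, List.countP_map, ← List.countP_eq_length_filter]
    rfl
  have hlen : g.values.length = g.keys.length := by
    simp [PySem.Dict.values, PySem.Dict.keys]
  omega

-- the whole computation after digit_pos is found, abstracted over key/result extraction
theorem core (f : Int → Int) (r : Int → String) (l : List Int) :
    (let d := l.foldl (fun d i =>
        match d.get? (f i) with
        | none => d.insert (f i) [r i]
        | some vs => d.insert (f i) (vs ++ [r i])) PySem.Dict.empty
     let d2 := d.keys.foldl (fun d2 k => d2.insert k (checkVals (d.getD k [])))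
                 (PySem.Dict.empty : PySem.Dict Int Bool)
     let spg := PySem.Int.truncdiv 100 (d2.size : Int)
     d2.values.foldl (fun score v => if v == true then score + spg else score) 0)
    = (let st := l.foldl (fun st i =>
          let k := f i
          let keys := if k ∈ st.1 then st.1 else st.1 ++ [k]
          let bad := if r i ≠ "OK" ∧ k ∉ st.2 then st.2 ++ [k] else st.2
          (keys, bad)) (([] : List Int), ([] : List Int))
       let spg := PySem.Int.truncdiv 100 (st.1.length : Int)
       spg * ((st.1.length : Int) - (st.2.length : Int))) := by
  simp only
  have hnd := groupA_keys_nodup f r l PySem.Dict.empty (by simp)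
  rw [phase2_eq _ hnd, ← fold_rel' f r l, sum_if_true]
  obtain ⟨I1, I2, I3, I4⟩ := fold_inv f r l PySem.Dict.empty [] []
    (by simp) (by simp) (by simp) (by simp)
  rw [I1]
  have hsz : (l.foldl (fun g i => g.insert (f i) (g.getD (f i) true && (r i == "OK")))
      (PySem.Dict.empty : PySem.Dict Int Bool)).size
      = (l.foldl (fun g i => g.insert (f i) (g.getD (f i) true && (r i == "OK")))
      (PySem.Dict.empty : PySem.Dict Int Bool)).keys.length := by
    simp [PySem.Dict.size, PySem.Dict.keys]
  rw [hsz, zero_add]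
  have hcount := count_true_eq _ _ I2 I3 I4
  rw [hcount]
  ring

theorem ports_eq (T R : List String) : solution T R = solution_alt T R := by
  unfold solution solution_alt
  cases PySem.List.pyGet? T 0 with
  | none => rfl
  | some t0 =>
    dsimp only
    cases ((List.range t0.toList.length).filter
            (fun i => PySem.Chars.isdigit (t0.toList.getD i ' '))).head? with
    | none => rfl
    | some digit_pos =>
      dsimp only
      exact core
        (fun i => (PySem.Int.ofChars?
          [(PySem.Chars.pyGet? (PySem.List.pyGetD T i "").toList (digit_pos : Int)).getD ' ']).getD 0)
        (fun i => PySem.List.pyGetD R i "")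
        (PySem.List.pyRange 0 (T.length : Int) 1)

-- ===== VERDICT (by name: the statement is the Claim_ definition above) =====
theorem solution_spec : Claim_equal_solution := by
  intro T R _ _
  unfold Spec_solution
  exact ports_eq T R
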